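-- pv_equiv track=rewrite | github.com/RayhanAsadel/TopologicalSort-DecreaseAndConquer | src/13519196.py | deleteVertexAndConnection
-- ===== SOURCE A (Python) =====
-- def deleteVertexAndConnection(matriks,indeksMatkul):
--     #Menghapus simpul dengan posisi baris indeksMatkul, dan semua busur yang keluar dari simpul tersebut
--     for i in range(len(matriks)):
--         for j in range(len(matriks)):
--             if (i==indeksMatkul):
--                 matriks[indeksMatkul][j] = -1
--             elif (j==indeksMatkul) and (matriks[i][indeksMatkul]==1) :
--                 matriks[i][indeksMatkul] = -1
--
--     return matriks
-- ===== SOURCE B (Python) =====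
-- def deleteVertexAndConnection(matriks, indeksMatkul):
--     # Single pass over the rows (mutates matriks in place, like the original).
--     n = len(matriks)
--     if not (0 <= indeksMatkul < n):
--         return matriks
--     for i, row in enumerate(matriks):
--         if i == indeksMatkul:
--             for j in range(n):
--                 row[j] = -1
--         elif row[indeksMatkul] == 1:
--             row[indeksMatkul] = -1
--     return matriks
-- ===== Notes on version B (the rewrite author's own statement) =====
-- stated objective: faster
-- what changed: Replaces the nested index loops (n^2 iterations touching every (i,j) pair) with a single pass over the rows: only the target row gets an inner write loop and every other row gets one conditional cell update, so the quadratic iteration count disappears.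
import Mathlib
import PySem

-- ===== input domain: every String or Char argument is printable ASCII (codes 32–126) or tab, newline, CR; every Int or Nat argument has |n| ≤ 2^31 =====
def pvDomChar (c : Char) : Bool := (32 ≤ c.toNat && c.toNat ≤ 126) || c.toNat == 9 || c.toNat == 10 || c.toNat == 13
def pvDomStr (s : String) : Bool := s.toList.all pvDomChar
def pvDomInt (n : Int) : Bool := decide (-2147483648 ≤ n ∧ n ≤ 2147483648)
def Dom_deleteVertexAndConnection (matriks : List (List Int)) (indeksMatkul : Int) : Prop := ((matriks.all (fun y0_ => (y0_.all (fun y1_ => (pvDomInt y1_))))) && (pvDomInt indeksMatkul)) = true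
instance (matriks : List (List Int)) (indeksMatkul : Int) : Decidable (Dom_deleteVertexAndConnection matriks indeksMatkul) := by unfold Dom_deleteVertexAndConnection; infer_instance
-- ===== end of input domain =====

-- B replaces A's O(n^2) nested index loops with one pass over the rows; the equivalence is
-- about the return value (both Pythons mutate matriks in place in the same way).

-- ===== PORT A =====
-- matriks[i][j] = v  (total here; Pre_ excludes the out-of-range writes, where Python raises)
def pvSetCell (m : List (List Int)) (i j : Nat) (v : Int) : List (List Int) :=
  m.set i ((m.getD i []).set j v)

def deleteVertexAndConnection (matriks : List (List Int)) (indeksMatkul : Int) : List (List Int) :=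
  (List.range matriks.length).foldl (fun (m : List (List Int)) (i : Nat) =>
    (List.range matriks.length).foldl (fun (m : List (List Int)) (j : Nat) =>
      if (i : Int) = indeksMatkul then
        pvSetCell m indeksMatkul.toNat j (-1)
      else if (j : Int) = indeksMatkul ∧ (m.getD i []).getD indeksMatkul.toNat 0 = 1 then
        pvSetCell m i indeksMatkul.toNat (-1)
      else m) m) matriks

-- ===== PORT B =====
def deleteVertexAndConnection_alt (matriks : List (List Int)) (indeksMatkul : Int) : List (List Int) :=
  if 0 ≤ indeksMatkul ∧ indeksMatkul < (matriks.length : Int) then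
    (PySem.List.enumerate matriks 0).map (fun (p : Int × List Int) =>
      if p.1 = indeksMatkul then
        (List.range matriks.length).foldl (fun (r : List Int) (j : Nat) => r.set j (-1)) p.2
      else if p.2.getD indeksMatkul.toNat 0 = 1 then p.2.set indeksMatkul.toNat (-1)
      else p.2)
  else matriks

-- ===== PRECONDITION & SPEC =====
-- Pre_ excludes exactly the inputs where both Pythons raise IndexError: a valid row index
-- whose row is shorter than len(matriks), or some row not longer than indeksMatkul.
def Pre_deleteVertexAndConnection (matriks : List (List Int)) (indeksMatkul : Int) : Prop :=
  (0 ≤ indeksMatkul ∧ indeksMatkul < (matriks.length : Int)) →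
    (matriks.length ≤ (matriks.getD indeksMatkul.toNat []).length ∧
     ∀ r ∈ matriks, indeksMatkul < (r.length : Int))
instance (matriks : List (List Int)) (indeksMatkul : Int) : Decidable (Pre_deleteVertexAndConnection matriks indeksMatkul) := by unfold Pre_deleteVertexAndConnection; infer_instance

def pvWitness_deleteVertexAndConnection : List (List Int) × Int := ([[0, 1], [1, 0]], 0)

def Spec_deleteVertexAndConnection (matriks : List (List Int)) (indeksMatkul : Int) (out : List (List Int)) : Prop := out = deleteVertexAndConnection_alt matriks indeksMatkul
instance (matriks : List (List Int)) (indeksMatkul : Int) (out : List (List Int)) : Decidable (Spec_deleteVertexAndConnection matriks indeksMatkul out) := by unfold Spec_deleteVertexAndConnection; infer_instance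

-- ===== CLAIM (what is proved, stated in full; the proofs are below) =====
def Claim_equal_deleteVertexAndConnection : Prop := ∀ (matriks : List (List Int)) (indeksMatkul : Int), Dom_deleteVertexAndConnection matriks indeksMatkul → Pre_deleteVertexAndConnection matriks indeksMatkul → Spec_deleteVertexAndConnection matriks indeksMatkul (deleteVertexAndConnection matriks indeksMatkul)

-- ===== LEMMAS AND PROOFS =====

-- the per-row transform both programs compute (n = #rows, k = target index)
def pvG (n k : Nat) (i : Nat) (r : List Int) : List Int :=
  if i = k then (List.range n).foldl (fun (r : List Int) (j : Nat) => r.set j (-1)) r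
  else if r.getD k 0 = 1 then r.set k (-1) else r

def pvRows (n k : Nat) : Nat → List (List Int) → List (List Int)
  | _, [] => []
  | s, r :: t => pvG n k s r :: pvRows n k (s + 1) t

lemma pv_foldl_fix {α β : Type} (l : List β) (f : α → β → α)
    (h : ∀ a b, b ∈ l → f a b = a) (acc : α) : l.foldl f acc = acc := by
  induction l generalizing acc with
  | nil => rfl
  | cons x t ih =>
      simp only [List.foldl_cons]
      rw [h acc x (by simp)]
      exact ih (fun a b hb => h a b (by simp [hb])) acc

lemma pv_getD_append_cons {α : Type} (pre : List α) (r : α) (t : List α) (d : α) :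
    (pre ++ r :: t).getD pre.length d = r := by
  induction pre with
  | nil => rfl
  | cons x p ih => simp

lemma pv_set_append_cons {α : Type} (pre : List α) (r x : α) (t : List α) :
    (pre ++ r :: t).set pre.length x = pre ++ x :: t := by
  induction pre with
  | nil => rfl
  | cons y p ih => simp [ih]

lemma pv_fold_setCell (js : List Nat) (v : Int) (pre t : List (List Int)) (r : List Int) :
    js.foldl (fun (m : List (List Int)) (j : Nat) => pvSetCell m pre.length j v) (pre ++ r :: t)
      = pre ++ (js.foldl (fun (r : List Int) (j : Nat) => r.set j v) r) :: t := by
  induction js generalizing r with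
  | nil => rfl
  | cons j js ih =>
      simp only [List.foldl_cons]
      have hstep : pvSetCell (pre ++ r :: t) pre.length j v = pre ++ r.set j v :: t := by
        unfold pvSetCell
        rw [pv_getD_append_cons, pv_set_append_cons]
      rw [hstep, ih]

lemma pv_range_only_k {α : Type} (N k : Nat) (f : α → Nat → α)
    (hid : ∀ a j, j ≠ k → f a j = a) (hk : k < N) (acc : α) :
    (List.range N).foldl f acc = f acc k := by
  induction N with
  | zero => omega
  | succ m ih =>
      rw [List.range_succ, List.foldl_append]
      simp only [List.foldl_cons, List.foldl_nil]
      by_cases h : k < m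
      · rw [ih h, hid _ m (by omega)]
      · have hkm : k = m := by omega
        subst hkm
        rw [pv_foldl_fix _ _ (fun a b hb => hid a b (by
          have := List.mem_range.mp hb; omega)) acc]

-- the outer loop writes each row exactly once, at its own index
lemma pv_outer_aux (matriks : List (List Int)) (indeksMatkul : Int)
    (h0 : 0 ≤ indeksMatkul) (hn : indeksMatkul < (matriks.length : Int)) :
    ∀ (l pre : List (List Int)), pre.length + l.length = matriks.length →
      l = matriks.drop pre.length →
      (List.range' pre.length l.length).foldl (fun (m : List (List Int)) (i : Nat) =>
        (List.range matriks.length).foldl (fun (m : List (List Int)) (j : Nat) =>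
          if (i : Int) = indeksMatkul then
            pvSetCell m indeksMatkul.toNat j (-1)
          else if (j : Int) = indeksMatkul ∧ (m.getD i []).getD indeksMatkul.toNat 0 = 1 then
            pvSetCell m i indeksMatkul.toNat (-1)
          else m) m) (pre ++ l)
      = pre ++ pvRows matriks.length indeksMatkul.toNat pre.length l := by
  intro l
  induction l with
  | nil => intro pre _ _; simp [pvRows]
  | cons r t ih =>
      intro pre hlen hdrop
      have hstep : (List.range matriks.length).foldl (fun (m : List (List Int)) (j : Nat) =>
          if ((pre.length : Nat) : Int) = indeksMatkul then
            pvSetCell m indeksMatkul.toNat j (-1)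
          else if (j : Int) = indeksMatkul ∧ (m.getD pre.length []).getD indeksMatkul.toNat 0 = 1 then
            pvSetCell m pre.length indeksMatkul.toNat (-1)
          else m) (pre ++ r :: t)
          = pre ++ pvG matriks.length indeksMatkul.toNat pre.length r :: t := by
        by_cases hik : pre.length = indeksMatkul.toNat
        · -- target row: every j fires the first branch
          have hicast : ((pre.length : Nat) : Int) = indeksMatkul := by omega
          simp only [hicast, if_true]
          rw [← hik, pv_fold_setCell]
          simp [pvG, hik]
        · have hicast : ((pre.length : Nat) : Int) ≠ indeksMatkul := by omega
          have hklt : indeksMatkul.toNat < matriks.length := by omega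
          simp only [if_neg hicast]
          rw [pv_range_only_k _ indeksMatkul.toNat _
            (fun a j hj => by
              rw [if_neg]; rintro ⟨h1, -⟩; exact hj (by omega)) hklt]
          have hkcast : ((indeksMatkul.toNat : Nat) : Int) = indeksMatkul := by omega
          rw [pv_getD_append_cons]
          unfold pvG
          rw [if_neg hik]
          by_cases hc : r.getD indeksMatkul.toNat 0 = 1
          · rw [if_pos ⟨hkcast, hc⟩, if_pos hc]
            unfold pvSetCell
            rw [pv_getD_append_cons, pv_set_append_cons]
          · rw [if_neg (by rintro ⟨-, h2⟩; exact hc h2), if_neg hc]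
      have htd : t = matriks.drop (pre.length + 1) := by
        have : matriks.drop (pre.length + 1) = (matriks.drop pre.length).drop 1 := by
          rw [List.drop_drop]
        rw [this, ← hdrop]
        rfl
      simp only [List.length_cons, List.range'_succ, List.foldl_cons]
      rw [hstep]
      have hres := ih (pre ++ [pvG matriks.length indeksMatkul.toNat pre.length r])
        (by simp at hlen ⊢; omega) (by simpa using htd)
      simp only [List.length_append, List.length_cons, List.length_nil] at hres
      simp only [List.append_assoc, List.cons_append, List.nil_append] at hres
      rw [hres]
      simp [pvRows]

lemma pv_alt_rows (n : Nat) (idx : Int) (h0 : 0 ≤ idx) :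
    ∀ (l : List (List Int)) (s : Nat),
      (PySem.List.enumerate l (s : Int)).map (fun (p : Int × List Int) =>
        if p.1 = idx then (List.range n).foldl (fun (r : List Int) (j : Nat) => r.set j (-1)) p.2
        else if p.2.getD idx.toNat 0 = 1 then p.2.set idx.toNat (-1)
        else p.2)
      = pvRows n idx.toNat s l := by
  intro l
  induction l with
  | nil => intro s; simp [PySem.List.enumerate_nil, pvRows]
  | cons r t ih =>
      intro s
      rw [PySem.List.enumerate_cons, List.map_cons]
      simp only [pvRows]
      congr 1
      · unfold pvG
        by_cases h : (s : Int) = idx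
        · have h2 : s = idx.toNat := by omega
          rw [if_pos h, if_pos h2]
        · have h2 : ¬ s = idx.toNat := by omega
          rw [if_neg h, if_neg h2]
      · have h1 := ih (s + 1)
        rw [← h1]
        norm_num

-- ===== VERDICT (by name: the statement is the Claim_ definition above) =====
theorem deleteVertexAndConnection_spec : Claim_equal_deleteVertexAndConnection := by
  intro matriks indeksMatkul _ _
  unfold Spec_deleteVertexAndConnection deleteVertexAndConnection deleteVertexAndConnection_alt
  by_cases hin : 0 ≤ indeksMatkul ∧ indeksMatkul < (matriks.length : Int)
  · rw [if_pos hin]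
    have hA := pv_outer_aux matriks indeksMatkul hin.1 hin.2 matriks [] (by simp) (by simp)
    simp only [List.length_nil, List.nil_append] at hA
    rw [List.range_eq_range'] at hA ⊢
    rw [hA]
    have hB := pv_alt_rows matriks.length indeksMatkul hin.1 matriks 0
    rw [List.range_eq_range'] at hB
    simpa using hB.symm
  · rw [if_neg hin]
    apply pv_foldl_fix
    intro a i hi
    apply pv_foldl_fix
    intro b j hj
    have hi' := List.mem_range.mp hi
    have hj' := List.mem_range.mp hj
    rw [if_neg (by intro h; exact hin ⟨by omega, by omega⟩),
        if_neg (by rintro ⟨h, -⟩; exact hin ⟨by omega, by omega⟩)]
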